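-- pv_equiv track=rewrite | github.com/proggeguden/nmiai | astar-island/predictor.py | _precompute_settlement_distances
-- ===== SOURCE A (Python) =====
-- def _precompute_settlement_distances(initial_grid):
--     """Precompute Manhattan distance to nearest settlement for all cells.
--
--     Returns H×W list of lists with distances (999 if no settlements exist).
--     """
--     H = len(initial_grid)
--     W = len(initial_grid[0])
--     settlements = []
--     for r in range(H):
--         for c in range(W):
--             if initial_grid[r][c] in (1, 2):
--                 settlements.append((r, c))
--
--     if not settlements:
--         return [[999] * W for _ in range(H)]
--
--     # BFS from all settlements simultaneously for efficiency
--     dist = [[999] * W for _ in range(H)]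
--     from collections import deque
--     q = deque()
--     for sr, sc in settlements:
--         dist[sr][sc] = 0
--         q.append((sr, sc))
--
--     while q:
--         r, c = q.popleft()
--         for dr, dc in ((-1, 0), (1, 0), (0, -1), (0, 1)):
--             nr, nc = r + dr, c + dc
--             if 0 <= nr < H and 0 <= nc < W and dist[nr][nc] > dist[r][c] + 1:
--                 dist[nr][nc] = dist[r][c] + 1
--                 q.append((nr, nc))
--
--     return dist
-- ===== SOURCE B (Python) =====
-- def _precompute_settlement_distances(initial_grid):
--     """Two-sweep Manhattan distance transform (no BFS queue).
--
--     0 at settlements, 999 elsewhere; a forward row-major pass takes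
--     min(self, up+1, left+1) and a backward pass takes
--     min(self, down+1, right+1).  999 doubles as BFS's capped infinity.
--     """
--     H = len(initial_grid)
--     W = len(initial_grid[0])
--     dist = [[0 if initial_grid[r][c] in (1, 2) else 999 for c in range(W)]
--             for r in range(H)]
--     for r in range(H):
--         for c in range(W):
--             d = dist[r][c]
--             if r > 0 and dist[r - 1][c] + 1 < d:
--                 d = dist[r - 1][c] + 1
--             if c > 0 and dist[r][c - 1] + 1 < d:
--                 d = dist[r][c - 1] + 1
--             dist[r][c] = d
--     for r in range(H - 1, -1, -1):
--         for c in range(W - 1, -1, -1):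
--             d = dist[r][c]
--             if r + 1 < H and dist[r + 1][c] + 1 < d:
--                 d = dist[r + 1][c] + 1
--             if c + 1 < W and dist[r][c + 1] + 1 < d:
--                 d = dist[r][c + 1] + 1
--             dist[r][c] = d
--     return dist
-- ===== Notes on version B (the rewrite author's own statement) =====
-- stated objective: faster
-- what changed: Replaces the multi-source BFS with a deque by a two-sweep Manhattan distance transform: a forward row-major pass taking min(self, up+1, left+1) and a backward pass taking min(self, down+1, right+1), with 999 doubling as the capped infinity; the settlement list, the early return and the queue disappear.
import Mathlib
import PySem

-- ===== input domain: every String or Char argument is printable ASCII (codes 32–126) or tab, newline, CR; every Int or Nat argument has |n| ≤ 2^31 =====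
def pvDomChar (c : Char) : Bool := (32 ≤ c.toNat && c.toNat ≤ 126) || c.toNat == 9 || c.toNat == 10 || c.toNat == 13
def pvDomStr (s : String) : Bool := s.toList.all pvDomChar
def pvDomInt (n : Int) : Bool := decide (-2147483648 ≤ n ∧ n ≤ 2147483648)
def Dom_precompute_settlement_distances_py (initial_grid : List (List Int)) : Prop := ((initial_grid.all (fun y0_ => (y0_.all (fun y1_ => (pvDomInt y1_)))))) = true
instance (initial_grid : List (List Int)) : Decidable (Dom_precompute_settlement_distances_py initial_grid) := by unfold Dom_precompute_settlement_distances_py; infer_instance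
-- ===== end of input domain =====

-- B replaces A's multi-source BFS (deque) by a two-sweep Manhattan distance transform over the same table; same O(H*W) asymptotics, measured faster by a constant factor (no queue bookkeeping).


-- ===== PORT A =====
-- 2D indexing/assignment helpers shared by both ports: dist[r][c] read and write (indices are in range wherever the ports use them)
def pvGet2 (d : List (List Int)) (r c : Int) : Int :=
  PySem.List.pyGetD (PySem.List.pyGetD d r []) c 0

def pvSet2 (d : List (List Int)) (r c : Int) (v : Int) : List (List Int) :=
  d.set r.toNat ((PySem.List.pyGetD d r []).set c.toNat v)

-- settlements = [(r,c) for r in range(H) for c in range(W) if initial_grid[r][c] in (1,2)]  (A's nested scan, appends in order)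
def pvSettlements (grid : List (List Int)) (H W : Int) : List (Int × Int) :=
  (PySem.List.pyRange 0 H 1).foldl (fun acc r =>
    (PySem.List.pyRange 0 W 1).foldl (fun acc c =>
      if pvGet2 grid r c == 1 || pvGet2 grid r c == 2 then acc ++ [(r, c)] else acc) acc) []

-- dist = [[999]*W for _ in range(H)]
def pvInit999 (H W : Int) : List (List Int) :=
  (PySem.List.pyRange 0 H 1).map (fun _ => List.replicate W.toNat (999 : Int))

-- one neighbour relaxation of A's inner `for dr, dc in (…)` body, state = (dist, q)
def pvRelax (H W r c : Int) (st : List (List Int) × List (Int × Int)) (d : Int × Int) :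
    List (List Int) × List (Int × Int) :=
  let nr := r + d.1
  let nc := c + d.2
  if 0 ≤ nr ∧ nr < H ∧ 0 ≤ nc ∧ nc < W ∧ pvGet2 st.1 r c + 1 < pvGet2 st.1 nr nc then
    (pvSet2 st.1 nr nc (pvGet2 st.1 r c + 1), st.2 ++ [(nr, nc)])
  else st

-- the `while q:` loop; the fuel argument only makes the recursion structural, it is proved never to run out on admitted inputs
def pvBfs (H W : Int) : Nat → List (Int × Int) → List (List Int) → List (List Int)
  | 0, _, dist => dist
  | _ + 1, [], dist => dist
  | fuel + 1, (r, c) :: q, dist =>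
      let st := [((-1 : Int), (0 : Int)), (1, 0), (0, -1), (0, 1)].foldl (pvRelax H W r c) (dist, q)
      pvBfs H W fuel st.2 st.1

def precompute_settlement_distances_py (initial_grid : List (List Int)) : List (List Int) :=
  let H : Int := initial_grid.length
  let W : Int := (PySem.List.pyGetD initial_grid 0 []).length
  let settlements := pvSettlements initial_grid H W
  if settlements = [] then pvInit999 H W
  else
    let st := settlements.foldl (fun st s => (pvSet2 st.1 s.1 s.2 0, st.2 ++ [s]))
      (pvInit999 H W, ([] : List (Int × Int)))
    pvBfs H W (1000 * H.toNat * W.toNat + 1) st.2 st.1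

-- ===== PORT B =====
-- the body of the forward pass's inner loop: min(self, up+1, left+1) written into cell (r,c)
def pvFStep (r : Int) (dist : List (List Int)) (c : Int) : List (List Int) :=
  let d0 := pvGet2 dist r c
  let d1 := if 0 < r ∧ pvGet2 dist (r - 1) c + 1 < d0 then pvGet2 dist (r - 1) c + 1 else d0
  let d2 := if 0 < c ∧ pvGet2 dist r (c - 1) + 1 < d1 then pvGet2 dist r (c - 1) + 1 else d1
  pvSet2 dist r c d2

-- the body of the backward pass's inner loop: min(self, down+1, right+1) written into cell (r,c)
def pvBStep (H W r : Int) (dist : List (List Int)) (c : Int) : List (List Int) :=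
  let d0 := pvGet2 dist r c
  let d1 := if r + 1 < H ∧ pvGet2 dist (r + 1) c + 1 < d0 then pvGet2 dist (r + 1) c + 1 else d0
  let d2 := if c + 1 < W ∧ pvGet2 dist r (c + 1) + 1 < d1 then pvGet2 dist r (c + 1) + 1 else d1
  pvSet2 dist r c d2

-- forward pass: row-major
def pvSweepF (H W : Int) (dist : List (List Int)) : List (List Int) :=
  (PySem.List.pyRange 0 H 1).foldl (fun dist r =>
    (PySem.List.pyRange 0 W 1).foldl (pvFStep r) dist) dist

-- backward pass: reverse row-major
def pvSweepB (H W : Int) (dist : List (List Int)) : List (List Int) :=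
  (PySem.List.pyRange (H - 1) (-1) (-1)).foldl (fun dist r =>
    (PySem.List.pyRange (W - 1) (-1) (-1)).foldl (pvBStep H W r) dist) dist

def precompute_settlement_distances_py_alt (initial_grid : List (List Int)) : List (List Int) :=
  let H : Int := initial_grid.length
  let W : Int := (PySem.List.pyGetD initial_grid 0 []).length
  let dist := (PySem.List.pyRange 0 H 1).map (fun r =>
    (PySem.List.pyRange 0 W 1).map (fun c =>
      if pvGet2 initial_grid r c == 1 || pvGet2 initial_grid r c == 2 then (0 : Int) else 999))
  pvSweepB H W (pvSweepF H W dist)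

-- ===== PRECONDITION & SPEC =====
-- Pre_ excludes exactly the inputs where A raises IndexError: the empty grid (len(initial_grid[0])) and
-- ragged grids in which some row is shorter than row 0 (initial_grid[r][c] for c < W).
def Pre_precompute_settlement_distances_py (initial_grid : List (List Int)) : Prop :=
  initial_grid ≠ [] ∧ ∀ row ∈ initial_grid, initial_grid.headI.length ≤ row.length
instance (initial_grid : List (List Int)) : Decidable (Pre_precompute_settlement_distances_py initial_grid) := by
  unfold Pre_precompute_settlement_distances_py; infer_instance

def pvWitness_precompute_settlement_distances_py : List (List Int) := [[1, 0, 0], [0, 0, 2]]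

def Spec_precompute_settlement_distances_py (initial_grid : List (List Int)) (out : List (List Int)) : Prop := out = precompute_settlement_distances_py_alt initial_grid
instance (initial_grid : List (List Int)) (out : List (List Int)) : Decidable (Spec_precompute_settlement_distances_py initial_grid out) := by unfold Spec_precompute_settlement_distances_py; infer_instance

-- ===== CLAIM (what is proved, stated in full; the proofs are below) =====
def Claim_equal_precompute_settlement_distances_py : Prop := ∀ (initial_grid : List (List Int)), Dom_precompute_settlement_distances_py initial_grid → Pre_precompute_settlement_distances_py initial_grid → Spec_precompute_settlement_distances_py initial_grid (precompute_settlement_distances_py initial_grid)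


-- ===== LEMMAS AND PROOFS =====

-- proof-side notions: in-range cells, table dimensions, Manhattan distance, capped minimum distance
def pvInR (H W : Int) (p : Int × Int) : Prop := 0 ≤ p.1 ∧ p.1 < H ∧ 0 ≤ p.2 ∧ p.2 < W

def pvDims (H W : Int) (d : List (List Int)) : Prop :=
  d.length = H.toNat ∧ ∀ row ∈ d, row.length = W.toNat

def pvManh (s p : Int × Int) : Int := ((s.1 - p.1).natAbs : Int) + ((s.2 - p.2).natAbs : Int)

def pvLb (S : List (Int × Int)) (p : Int × Int) : Int := S.foldl (fun m s => min m (pvManh s p)) 999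

def pvF1 (S : List (Int × Int)) (p : Int × Int) : Int :=
  pvLb (S.filter (fun s => decide (s.1 ≤ p.1 ∧ s.2 ≤ p.2))) p

lemma pvGet2_eq_getElem {H W : Int} {d : List (List Int)} (hd : pvDims H W d) {p : Int × Int}
    (hp : pvInR H W p) (h1 : p.1.toNat < d.length) (h2 : p.2.toNat < d[p.1.toNat].length) :
    pvGet2 d p.1 p.2 = d[p.1.toNat][p.2.toNat] := by
  obtain ⟨hp1, hp2, hp3, hp4⟩ := hp
  unfold pvGet2
  rw [PySem.List.pyGetD_eq_getElem (h0 := hp1) (h1 := by omega)]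
  rw [PySem.List.pyGetD_eq_getElem (h0 := hp3) (h1 := by omega)]

lemma pvInR_bounds {H W : Int} {d : List (List Int)} (hd : pvDims H W d) {p : Int × Int}
    (hp : pvInR H W p) : ∃ (h1 : p.1.toNat < d.length), p.2.toNat < d[p.1.toNat].length := by
  obtain ⟨hp1, hp2, hp3, hp4⟩ := hp
  have h1 : p.1.toNat < d.length := by rw [hd.1]; omega
  refine ⟨h1, ?_⟩
  rw [hd.2 _ (List.getElem_mem h1)]; omega

lemma pvDims_set2 {H W : Int} {d : List (List Int)} (hd : pvDims H W d) {p : Int × Int}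
    (hp : pvInR H W p) (v : Int) : pvDims H W (pvSet2 d p.1 p.2 v) := by
  obtain ⟨h1, h2⟩ := pvInR_bounds hd hp
  refine ⟨by simpa [pvSet2] using hd.1, ?_⟩
  intro row hrow
  rcases List.mem_or_eq_of_mem_set hrow with h | h
  · exact hd.2 _ h
  · subst h
    rw [List.length_set, PySem.List.pyGetD_eq_getElem (h0 := hp.1) (h1 := by omega)]
    exact hd.2 _ (List.getElem_mem h1)

lemma pvGet2_set2_self {H W : Int} {d : List (List Int)} (hd : pvDims H W d) {p : Int × Int}
    (hp : pvInR H W p) (v : Int) : pvGet2 (pvSet2 d p.1 p.2 v) p.1 p.2 = v := by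
  obtain ⟨h1, h2⟩ := pvInR_bounds hd hp
  obtain ⟨g1, g2⟩ := pvInR_bounds (pvDims_set2 hd hp v) hp
  obtain ⟨hp1, hp2, hp3, hp4⟩ := hp
  have hrow : PySem.List.pyGetD d p.1 [] = d[p.1.toNat] :=
    PySem.List.pyGetD_eq_getElem d [] hp1 (by omega)
  rw [pvGet2_eq_getElem (pvDims_set2 hd ⟨hp1, hp2, hp3, hp4⟩ v) ⟨hp1, hp2, hp3, hp4⟩ g1 g2]
  simp only [pvSet2, hrow]
  simp [List.getElem_set]

lemma pvGet2_set2_ne {H W : Int} {d : List (List Int)} (hd : pvDims H W d) {p q : Int × Int}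
    (hp : pvInR H W p) (hq : pvInR H W q) (hne : p ≠ q) (v : Int) :
    pvGet2 (pvSet2 d p.1 p.2 v) q.1 q.2 = pvGet2 d q.1 q.2 := by
  obtain ⟨h1, h2⟩ := pvInR_bounds hd hq
  obtain ⟨g1, g2⟩ := pvInR_bounds (pvDims_set2 hd hp v) hq
  rw [pvGet2_eq_getElem (pvDims_set2 hd hp v) hq g1 g2, pvGet2_eq_getElem hd hq h1 h2]
  have hL : d.length = H.toNat := hd.1
  obtain ⟨hp1, hp2, hp3, hp4⟩ := hp
  obtain ⟨hq1, hq2, hq3, hq4⟩ := hq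
  have hrow : PySem.List.pyGetD d p.1 [] = d[p.1.toNat]'(by omega) :=
    PySem.List.pyGetD_eq_getElem d [] hp1 (by omega)
  simp only [pvSet2, hrow]
  by_cases hr : p.1.toNat = q.1.toNat
  · have hcc : p.2.toNat ≠ q.2.toNat := by
      have hcr : p.1 = q.1 := by omega
      have : p.2 ≠ q.2 := fun h => hne (Prod.ext hcr h)
      omega
    simp only [← hr]
    simp [List.getElem_set, hcc]
  · simp [List.getElem_set, hr]

lemma pvTable_ext {H W : Int} {d d' : List (List Int)} (hd : pvDims H W d) (hd' : pvDims H W d')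
    (h : ∀ p : Int × Int, pvInR H W p → pvGet2 d p.1 p.2 = pvGet2 d' p.1 p.2) : d = d' := by
  apply List.ext_getElem (by rw [hd.1, hd'.1])
  intro i hi hi'
  apply List.ext_getElem (by rw [hd.2 _ (List.getElem_mem hi), hd'.2 _ (List.getElem_mem hi')])
  intro j hj hj'
  have hiH : (i : Int) < H := by have := hd.1; omega
  have hjW : (j : Int) < W := by
    have := hd.2 _ (List.getElem_mem hi); omega
  have hp : pvInR H W ((i : Int), (j : Int)) := ⟨by omega, hiH, by omega, hjW⟩
  have := h _ hp
  rwa [pvGet2_eq_getElem hd hp (by simpa using hi) (by simpa using hj),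
       pvGet2_eq_getElem hd' hp (by simpa using hi') (by simpa using hj')] at this

-- min-fold facts about pvLb
lemma pvLb_le_aux (S : List (Int × Int)) (p : Int × Int) (a : Int) :
    S.foldl (fun m s => min m (pvManh s p)) a ≤ a := by
  induction S generalizing a with
  | nil => simp
  | cons s S ih => exact le_trans (ih _) (by simp)

lemma pvLb_le_999 (S : List (Int × Int)) (p : Int × Int) : pvLb S p ≤ 999 := pvLb_le_aux S p 999

lemma pvManh_nonneg (s p : Int × Int) : 0 ≤ pvManh s p := by unfold pvManh; positivity

lemma pvLb_nonneg (S : List (Int × Int)) (p : Int × Int) : 0 ≤ pvLb S p := by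
  unfold pvLb
  have : ∀ a : Int, 0 ≤ a → 0 ≤ S.foldl (fun m s => min m (pvManh s p)) a := by
    intro a ha
    induction S generalizing a with
    | nil => simpa
    | cons s S ih => exact ih _ (le_min ha (pvManh_nonneg s p))
  exact this 999 (by norm_num)

lemma pvLb_le_manh {S : List (Int × Int)} {s : Int × Int} (hs : s ∈ S) (p : Int × Int) :
    pvLb S p ≤ pvManh s p := by
  unfold pvLb
  have : ∀ (S : List (Int × Int)) (a : Int), s ∈ S →
      S.foldl (fun m s => min m (pvManh s p)) a ≤ pvManh s p := by
    intro S
    induction S with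
    | nil => intro a h; cases h
    | cons t S ih =>
      intro a h
      rcases List.mem_cons.mp h with h | h
      · subst h
        simp only [List.foldl_cons]
        exact le_trans (pvLb_le_aux S p _) (by simp)
      · exact ih _ h
  exact this S 999 hs

lemma le_pvLb {S : List (Int × Int)} {p : Int × Int} {x : Int} (h999 : x ≤ 999)
    (h : ∀ s ∈ S, x ≤ pvManh s p) : x ≤ pvLb S p := by
  unfold pvLb
  have : ∀ (S : List (Int × Int)), (∀ s ∈ S, x ≤ pvManh s p) → ∀ a : Int, x ≤ a →
      x ≤ S.foldl (fun m s => min m (pvManh s p)) a := by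
    intro S
    induction S with
    | nil => intro _ a ha; simpa
    | cons s S ih =>
      intro hmem a ha
      exact ih (fun t ht => hmem t (List.mem_cons_of_mem _ ht)) _
        (le_min ha (hmem s List.mem_cons_self))
  exact this S h 999 h999

lemma pvLb_cases (S : List (Int × Int)) (p : Int × Int) :
    pvLb S p = 999 ∨ ∃ s ∈ S, pvLb S p = pvManh s p := by
  unfold pvLb
  have : ∀ a : Int, S.foldl (fun m s => min m (pvManh s p)) a = a ∨
      ∃ s ∈ S, S.foldl (fun m s => min m (pvManh s p)) a = pvManh s p := by
    intro a
    induction S generalizing a with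
    | nil => simp
    | cons s S ih =>
      simp only [List.foldl_cons]
      rcases ih (min a (pvManh s p)) with h | ⟨t, ht, h⟩
      · rcases min_cases a (pvManh s p) with ⟨he, _⟩ | ⟨he, _⟩
        · left; rw [h, he]
        · right; exact ⟨s, List.mem_cons_self, by rw [h, he]⟩
      · right; exact ⟨t, List.mem_cons_of_mem _ ht, h⟩
  exact this 999



lemma pvLb_lipschitz (S : List (Int × Int)) (p q : Int × Int) :
    pvLb S p ≤ pvLb S q + pvManh q p := by
  rcases pvLb_cases S q with h | ⟨s, hs, h⟩
  · exact le_trans (pvLb_le_999 S p) (by have := pvManh_nonneg q p; omega)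
  · refine le_trans (pvLb_le_manh hs p) ?_
    rw [h]; unfold pvManh; (try dsimp only); omega

-- the value the sweep body computes from candidates a (self), b+1 (guard gb), c+1 (guard gc)
lemma pvMin3_eq {a b c x : Int} {gb gc : Prop} [Decidable gb] [Decidable gc]
    (h0 : x ≤ a) (h1 : gb → x ≤ b + 1) (h2 : gc → x ≤ c + 1)
    (h3 : a ≤ x ∨ (gb ∧ b + 1 ≤ x) ∨ (gc ∧ c + 1 ≤ x)) :
    (if gc ∧ c + 1 < (if gb ∧ b + 1 < a then b + 1 else a) then c + 1
     else (if gb ∧ b + 1 < a then b + 1 else a)) = x := by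
  by_cases hgb : gb <;> by_cases hgc : gc
  · have := h1 hgb; have := h2 hgc
    simp only [hgb, hgc, true_and]
    rcases h3 with h | ⟨_, h⟩ | ⟨_, h⟩ <;> split_ifs <;> omega
  · have := h1 hgb
    simp only [hgb, hgc, true_and, false_and, if_false]
    rcases h3 with h | ⟨_, h⟩ | ⟨hg, _⟩
    · split_ifs <;> omega
    · split_ifs <;> omega
    · exact absurd hg hgc
  · have := h2 hgc
    simp only [hgb, hgc, true_and, false_and, if_false]
    rcases h3 with h | ⟨hg, _⟩ | ⟨_, h⟩
    · split_ifs <;> omega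
    · exact absurd hg hgb
    · split_ifs <;> omega
  · simp only [hgb, hgc, false_and, if_false]
    rcases h3 with h | ⟨hg, _⟩ | ⟨hg, _⟩
    · omega
    · exact absurd hg hgb
    · exact absurd hg hgc

lemma pvF1_le_initv {S : List (Int × Int)} {p : Int × Int} :
    pvF1 S p ≤ (if p ∈ S then (0 : Int) else 999) := by
  split_ifs with h
  · have hm : p ∈ S.filter (fun s => decide (s.1 ≤ p.1 ∧ s.2 ≤ p.2)) := by
      simp [List.mem_filter, h]
    have := pvLb_le_manh hm p
    unfold pvF1
    unfold pvManh at this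
    omega
  · exact pvLb_le_999 _ _

lemma pvF1_le_up {S : List (Int × Int)} {p : Int × Int} :
    pvF1 S p ≤ pvF1 S (p.1 - 1, p.2) + 1 := by
  unfold pvF1
  (try dsimp only)
  rcases pvLb_cases (S.filter (fun s => decide (s.1 ≤ p.1 - 1 ∧ s.2 ≤ p.2)))
      (p.1 - 1, p.2) with h | ⟨s, hs, h⟩
  · have := pvLb_le_999 (S.filter (fun s => decide (s.1 ≤ p.1 ∧ s.2 ≤ p.2))) p
    omega
  · rw [List.mem_filter] at hs
    have hc := hs.2
    (try dsimp only at hc)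
    rw [decide_eq_true_eq] at hc
    have hm : s ∈ S.filter (fun s => decide (s.1 ≤ p.1 ∧ s.2 ≤ p.2)) := by
      rw [List.mem_filter, decide_eq_true_eq]; exact ⟨hs.1, by omega⟩
    have h2 := pvLb_le_manh hm p
    have hle : pvManh s p ≤ pvManh s (p.1 - 1, p.2) + 1 := by
      unfold pvManh; (try dsimp only); omega
    omega

lemma pvF1_le_left {S : List (Int × Int)} {p : Int × Int} :
    pvF1 S p ≤ pvF1 S (p.1, p.2 - 1) + 1 := by
  unfold pvF1
  (try dsimp only)
  rcases pvLb_cases (S.filter (fun s => decide (s.1 ≤ p.1 ∧ s.2 ≤ p.2 - 1)))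
      (p.1, p.2 - 1) with h | ⟨s, hs, h⟩
  · have := pvLb_le_999 (S.filter (fun s => decide (s.1 ≤ p.1 ∧ s.2 ≤ p.2))) p
    omega
  · rw [List.mem_filter] at hs
    have hc := hs.2
    (try dsimp only at hc)
    rw [decide_eq_true_eq] at hc
    have hm : s ∈ S.filter (fun s => decide (s.1 ≤ p.1 ∧ s.2 ≤ p.2)) := by
      rw [List.mem_filter, decide_eq_true_eq]; exact ⟨hs.1, by omega⟩
    have h2 := pvLb_le_manh hm p
    have hle : pvManh s p ≤ pvManh s (p.1, p.2 - 1) + 1 := by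
      unfold pvManh; (try dsimp only); omega
    omega

lemma pvF1_attained {H W : Int} {S : List (Int × Int)} (hS : ∀ s ∈ S, pvInR H W s)
    {p : Int × Int} :
    (if p ∈ S then (0 : Int) else 999) ≤ pvF1 S p ∨
      (0 < p.1 ∧ pvF1 S (p.1 - 1, p.2) + 1 ≤ pvF1 S p) ∨
      (0 < p.2 ∧ pvF1 S (p.1, p.2 - 1) + 1 ≤ pvF1 S p) := by
  rcases pvLb_cases (S.filter (fun s => decide (s.1 ≤ p.1 ∧ s.2 ≤ p.2))) p with h | ⟨s, hs, h⟩
  · left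
    have : pvF1 S p = 999 := h
    rw [this]
    split_ifs <;> omega
  · rw [List.mem_filter, decide_eq_true_eq] at hs
    have hF1 : pvF1 S p = pvManh s p := h
    by_cases hsp : s = p
    · left
      subst hsp
      have hz : pvManh s s = 0 := by unfold pvManh; (try dsimp only); omega
      rw [if_pos hs.1]; omega
    · have hne : s.1 < p.1 ∨ s.2 < p.2 := by
        rcases hs.2 with ⟨ha, hb⟩
        by_contra hc
        push_neg at hc
        exact hsp (Prod.ext (by omega) (by omega))
      rcases hne with hlt | hlt
      · right; left
        have hs1 := (hS s hs.1).1
        refine ⟨by omega, ?_⟩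
        have hm : s ∈ S.filter (fun t => decide (t.1 ≤ p.1 - 1 ∧ t.2 ≤ p.2)) := by
          rw [List.mem_filter, decide_eq_true_eq]; exact ⟨hs.1, by (try dsimp only); omega⟩
        have h2 := pvLb_le_manh hm (p.1 - 1, p.2)
        have h3 : pvManh s (p.1 - 1, p.2) + 1 = pvManh s p := by
          unfold pvManh; (try dsimp only); omega
        unfold pvF1
        (try dsimp only)
        omega
      · right; right
        have hs2 := (hS s hs.1).2.2.1
        refine ⟨by omega, ?_⟩
        have hm : s ∈ S.filter (fun t => decide (t.1 ≤ p.1 ∧ t.2 ≤ p.2 - 1)) := by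
          rw [List.mem_filter, decide_eq_true_eq]; exact ⟨hs.1, by (try dsimp only); omega⟩
        have h2 := pvLb_le_manh hm (p.1, p.2 - 1)
        have h3 : pvManh s (p.1, p.2 - 1) + 1 = pvManh s p := by
          unfold pvManh; (try dsimp only); omega
        unfold pvF1
        (try dsimp only)
        omega

lemma pvF1_rec {H W : Int} {S : List (Int × Int)} (hS : ∀ s ∈ S, pvInR H W s)
    {p : Int × Int} :
    (if 0 < p.2 ∧ pvF1 S (p.1, p.2 - 1) + 1 <
        (if 0 < p.1 ∧ pvF1 S (p.1 - 1, p.2) + 1 < (if p ∈ S then (0 : Int) else 999)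
         then pvF1 S (p.1 - 1, p.2) + 1 else (if p ∈ S then (0 : Int) else 999))
     then pvF1 S (p.1, p.2 - 1) + 1
     else (if 0 < p.1 ∧ pvF1 S (p.1 - 1, p.2) + 1 < (if p ∈ S then (0 : Int) else 999)
           then pvF1 S (p.1 - 1, p.2) + 1 else (if p ∈ S then (0 : Int) else 999))) = pvF1 S p :=
  pvMin3_eq pvF1_le_initv (fun _ => pvF1_le_up) (fun _ => pvF1_le_left) (pvF1_attained hS)

lemma pvLb_le_F1 {S : List (Int × Int)} {p : Int × Int} : pvLb S p ≤ pvF1 S p := by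
  unfold pvF1
  apply le_pvLb (pvLb_le_999 S p)
  intro s hs
  rw [List.mem_filter] at hs
  exact pvLb_le_manh hs.1 p

lemma pvLb_attained {H W : Int} {S : List (Int × Int)} (hS : ∀ s ∈ S, pvInR H W s)
    {p : Int × Int} (hp : pvInR H W p) :
    pvF1 S p ≤ pvLb S p ∨
      (p.1 + 1 < H ∧ pvLb S (p.1 + 1, p.2) + 1 ≤ pvLb S p) ∨
      (p.2 + 1 < W ∧ pvLb S (p.1, p.2 + 1) + 1 ≤ pvLb S p) := by
  rcases pvLb_cases S p with h | ⟨s, hs, h⟩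
  · left; rw [h]; unfold pvF1; exact pvLb_le_999 _ _
  · by_cases hcone : s.1 ≤ p.1 ∧ s.2 ≤ p.2
    · left
      have hm : s ∈ S.filter (fun t => decide (t.1 ≤ p.1 ∧ t.2 ≤ p.2)) := by
        rw [List.mem_filter, decide_eq_true_eq]; exact ⟨hs, hcone⟩
      have := pvLb_le_manh hm p
      unfold pvF1
      omega
    · have hsp := hS s hs
      obtain ⟨hs1, hs2, hs3, hs4⟩ := hsp
      rcases (by omega : p.1 < s.1 ∨ p.2 < s.2) with hlt | hlt
      · right; left
        refine ⟨by omega, ?_⟩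
        have h2 := pvLb_le_manh hs (p.1 + 1, p.2)
        have h3 : pvManh s (p.1 + 1, p.2) + 1 = pvManh s p := by
          unfold pvManh; (try dsimp only); omega
        omega
      · right; right
        refine ⟨by omega, ?_⟩
        have h2 := pvLb_le_manh hs (p.1, p.2 + 1)
        have h3 : pvManh s (p.1, p.2 + 1) + 1 = pvManh s p := by
          unfold pvManh; (try dsimp only); omega
        omega

lemma pvLb_le_down {S : List (Int × Int)} {p : Int × Int} :
    pvLb S p ≤ pvLb S (p.1 + 1, p.2) + 1 := by
  have := pvLb_lipschitz S p (p.1 + 1, p.2)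
  have h : pvManh (p.1 + 1, p.2) p = 1 := by unfold pvManh; (try dsimp only); omega
  omega

lemma pvLb_le_right {S : List (Int × Int)} {p : Int × Int} :
    pvLb S p ≤ pvLb S (p.1, p.2 + 1) + 1 := by
  have := pvLb_lipschitz S p (p.1, p.2 + 1)
  have h : pvManh (p.1, p.2 + 1) p = 1 := by unfold pvManh; (try dsimp only); omega
  omega

lemma pvLb_rec {H W : Int} {S : List (Int × Int)} (hS : ∀ s ∈ S, pvInR H W s)
    {p : Int × Int} (hp : pvInR H W p) :
    (if p.2 + 1 < W ∧ pvLb S (p.1, p.2 + 1) + 1 <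
        (if p.1 + 1 < H ∧ pvLb S (p.1 + 1, p.2) + 1 < pvF1 S p
         then pvLb S (p.1 + 1, p.2) + 1 else pvF1 S p)
     then pvLb S (p.1, p.2 + 1) + 1
     else (if p.1 + 1 < H ∧ pvLb S (p.1 + 1, p.2) + 1 < pvF1 S p
           then pvLb S (p.1 + 1, p.2) + 1 else pvF1 S p)) = pvLb S p :=
  pvMin3_eq pvLb_le_F1 (fun _ => pvLb_le_down) (fun _ => pvLb_le_right) (pvLb_attained hS hp)

-- evaluating one forward step at (r, c) when up/left already hold pvF1 and (r, c) still holds its seed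
lemma pvFStep_eval {H W : Int} {S : List (Int × Int)} (hS : ∀ s ∈ S, pvInR H W s)
    {d : List (List Int)} {r cs : Int} (hd : pvDims H W d) (hin : pvInR H W (r, cs))
    (e0 : pvGet2 d r cs = (if (r, cs) ∈ S then (0 : Int) else 999))
    (e1 : 0 < r → pvGet2 d (r - 1) cs = pvF1 S (r - 1, cs))
    (e2 : 0 < cs → pvGet2 d r (cs - 1) = pvF1 S (r, cs - 1)) :
    pvFStep r d cs = pvSet2 d r cs (pvF1 S (r, cs)) := by
  have h := pvF1_rec (H := H) (W := W) (S := S) hS (p := (r, cs))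
  (try dsimp only at h)
  unfold pvFStep
  (try dsimp only)
  by_cases hr0 : 0 < r <;> by_cases hc0 : 0 < cs
  · rw [e0, e1 hr0, e2 hc0, h]
  · simp only [hc0, false_and, if_false] at h ⊢
    rw [e0, e1 hr0, h]
  · simp only [hr0, false_and, if_false] at h ⊢
    rw [e0, e2 hc0, h]
  · simp only [hr0, hc0, false_and, if_false] at h ⊢
    rw [e0, h]

-- evaluating one backward step at (r, c) when down/right already hold pvLb and (r, c) still holds pvF1
lemma pvBStep_eval {H W : Int} {S : List (Int × Int)} (hS : ∀ s ∈ S, pvInR H W s)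
    {d : List (List Int)} {r cs : Int} (hd : pvDims H W d) (hin : pvInR H W (r, cs))
    (e0 : pvGet2 d r cs = pvF1 S (r, cs))
    (e1 : r + 1 < H → pvGet2 d (r + 1) cs = pvLb S (r + 1, cs))
    (e2 : cs + 1 < W → pvGet2 d r (cs + 1) = pvLb S (r, cs + 1)) :
    pvBStep H W r d cs = pvSet2 d r cs (pvLb S (r, cs)) := by
  have h := pvLb_rec (H := H) (W := W) (S := S) hS hin
  (try dsimp only at h)
  unfold pvBStep
  (try dsimp only)
  by_cases hr0 : r + 1 < H <;> by_cases hc0 : cs + 1 < W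
  · rw [e0, e1 hr0, e2 hc0, h]
  · simp only [hc0, false_and, if_false] at h ⊢
    rw [e0, e1 hr0, h]
  · simp only [hr0, false_and, if_false] at h ⊢
    rw [e0, e2 hc0, h]
  · simp only [hr0, hc0, false_and, if_false] at h ⊢
    rw [e0, h]

lemma pvGet2_set2_self' {H W : Int} {d : List (List Int)} (hd : pvDims H W d) {r c : Int}
    (h : pvInR H W (r, c)) (v : Int) : pvGet2 (pvSet2 d r c v) r c = v := by
  simpa using pvGet2_set2_self hd h v

lemma pvGet2_set2_ne' {H W : Int} {d : List (List Int)} (hd : pvDims H W d) {r c : Int}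
    {q : Int × Int} (h : pvInR H W (r, c)) (hq : pvInR H W q) (hne : (r, c) ≠ q) (v : Int) :
    pvGet2 (pvSet2 d r c v) q.1 q.2 = pvGet2 d q.1 q.2 := by
  simpa using pvGet2_set2_ne hd h hq hne v

lemma pvDims_set2' {H W : Int} {d : List (List Int)} (hd : pvDims H W d) {r c : Int}
    (h : pvInR H W (r, c)) (v : Int) : pvDims H W (pvSet2 d r c v) := pvDims_set2 hd h v

lemma pvSweepF_inner {H W : Int} {S : List (Int × Int)} (hS : ∀ s ∈ S, pvInR H W s)
    {r : Int} (hr : 0 ≤ r) (hrH : r < H) :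
    ∀ (n : Nat) (cs : Int) (d : List (List Int)), (W - cs).toNat = n → 0 ≤ cs →
      pvDims H W d →
      (∀ p : Int × Int, pvInR H W p → (p.1 < r ∨ (p.1 = r ∧ p.2 < cs)) →
        pvGet2 d p.1 p.2 = pvF1 S p) →
      (∀ p : Int × Int, pvInR H W p → (r < p.1 ∨ (p.1 = r ∧ cs ≤ p.2)) →
        pvGet2 d p.1 p.2 = (if p ∈ S then (0 : Int) else 999)) →
      pvDims H W ((PySem.List.pyRange cs W 1).foldl (pvFStep r) d) ∧
      (∀ p : Int × Int, pvInR H W p → (p.1 < r ∨ p.1 = r) →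
        pvGet2 ((PySem.List.pyRange cs W 1).foldl (pvFStep r) d) p.1 p.2 = pvF1 S p) ∧
      (∀ p : Int × Int, pvInR H W p → r < p.1 →
        pvGet2 ((PySem.List.pyRange cs W 1).foldl (pvFStep r) d) p.1 p.2 =
          (if p ∈ S then (0 : Int) else 999)) := by
  intro n
  induction n with
  | zero =>
    intro cs d hn hcs hd hbef haft
    have hnil : PySem.List.pyRange cs W 1 = [] := PySem.List.pyRange_one_eq_nil (by omega)
    rw [hnil]
    simp only [List.foldl_nil]
    refine ⟨hd, ?_, ?_⟩
    · intro p hp hple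
      rcases hple with h | h
      · exact hbef p hp (Or.inl h)
      · exact hbef p hp (Or.inr ⟨h, by obtain ⟨_, _, _, h4⟩ := hp; omega⟩)
    · intro p hp hgt
      exact haft p hp (Or.inl hgt)
  | succ n ih =>
    intro cs d hn hcs hd hbef haft
    have hcsW : cs < W := by omega
    rw [PySem.List.pyRange_one_cons hcsW]
    simp only [List.foldl_cons]
    have hin : pvInR H W (r, cs) := ⟨hr, hrH, hcs, hcsW⟩
    have hstep : pvFStep r d cs = pvSet2 d r cs (pvF1 S (r, cs)) := by
      apply pvFStep_eval hS hd hin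
      · exact haft (r, cs) hin (Or.inr ⟨rfl, le_refl _⟩)
      · intro h0
        exact hbef (r - 1, cs) ⟨by omega, by omega, hcs, hcsW⟩ (Or.inl (by omega))
      · intro h0
        exact hbef (r, cs - 1) ⟨hr, hrH, by omega, by omega⟩ (Or.inr ⟨rfl, by omega⟩)
    rw [hstep]
    have hd' := pvDims_set2' hd hin (pvF1 S (r, cs))
    apply ih (cs + 1) _ (by omega) (by omega) hd'
    · intro p hp hreg
      by_cases hpe : (r, cs) = p
      · rw [← hpe]
        exact pvGet2_set2_self' hd hin _
      · rw [pvGet2_set2_ne' hd hin hp hpe _]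
        rcases hreg with h | ⟨h1, h2⟩
        · exact hbef p hp (Or.inl h)
        · by_cases hc : p.2 = cs
          · exact absurd (Prod.ext h1 hc).symm hpe
          · exact hbef p hp (Or.inr ⟨h1, by omega⟩)
    · intro p hp hreg
      have hpe : (r, cs) ≠ p := by
        intro heq
        rw [← heq] at hreg
        rcases hreg with h | ⟨h1, h2⟩ <;> (try dsimp only at *) <;> omega
      rw [pvGet2_set2_ne' hd hin hp hpe _]
      apply haft p hp
      rcases hreg with h | ⟨h1, h2⟩
      · exact Or.inl h
      · exact Or.inr ⟨h1, by omega⟩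

lemma pvSweepF_correct {H W : Int} {S : List (Int × Int)} (hS : ∀ s ∈ S, pvInR H W s) :
    ∀ (n : Nat) (rs : Int) (d : List (List Int)), (H - rs).toNat = n → 0 ≤ rs →
      pvDims H W d →
      (∀ p : Int × Int, pvInR H W p → p.1 < rs → pvGet2 d p.1 p.2 = pvF1 S p) →
      (∀ p : Int × Int, pvInR H W p → rs ≤ p.1 →
        pvGet2 d p.1 p.2 = (if p ∈ S then (0 : Int) else 999)) →
      pvDims H W ((PySem.List.pyRange rs H 1).foldl
        (fun dist r => (PySem.List.pyRange 0 W 1).foldl (pvFStep r) dist) d) ∧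
      (∀ p : Int × Int, pvInR H W p →
        pvGet2 ((PySem.List.pyRange rs H 1).foldl
          (fun dist r => (PySem.List.pyRange 0 W 1).foldl (pvFStep r) dist) d) p.1 p.2 = pvF1 S p) := by
  intro n
  induction n with
  | zero =>
    intro rs d hn hrs hd hbef _
    have hnil : PySem.List.pyRange rs H 1 = [] := PySem.List.pyRange_one_eq_nil (by omega)
    rw [hnil]
    simp only [List.foldl_nil]
    exact ⟨hd, fun p hp => hbef p hp (by obtain ⟨_, h2, _, _⟩ := hp; omega)⟩
  | succ n ih =>
    intro rs d hn hrs hd hbef haft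
    have hrsH : rs < H := by omega
    rw [PySem.List.pyRange_one_cons hrsH]
    simp only [List.foldl_cons]
    obtain ⟨hd', hle, hgt⟩ := pvSweepF_inner hS hrs hrsH (W - 0).toNat 0
      d (by omega) (by omega) hd
      (fun p hp hreg => by
        rcases hreg with h | ⟨h1, h2⟩
        · exact hbef p hp h
        · exact absurd h2 (by obtain ⟨_, _, h3, _⟩ := hp; omega))
      (fun p hp hreg => haft p hp (by rcases hreg with h | ⟨h1, _⟩ <;> omega))
    apply ih (rs + 1) _ (by omega) (by omega) hd'
    · intro p hp hlt
      apply hle p hp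
      omega
    · intro p hp hge
      exact hgt p hp (by omega)

lemma pvSweepB_inner {H W : Int} {S : List (Int × Int)} (hS : ∀ s ∈ S, pvInR H W s)
    {r : Int} (hr : 0 ≤ r) (hrH : r < H) :
    ∀ (n : Nat) (cs : Int) (d : List (List Int)), (cs + 1).toNat = n → cs < W →
      pvDims H W d →
      (∀ p : Int × Int, pvInR H W p → (r < p.1 ∨ (p.1 = r ∧ cs < p.2)) →
        pvGet2 d p.1 p.2 = pvLb S p) →
      (∀ p : Int × Int, pvInR H W p → (p.1 < r ∨ (p.1 = r ∧ p.2 ≤ cs)) →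
        pvGet2 d p.1 p.2 = pvF1 S p) →
      pvDims H W ((PySem.List.pyRange cs (-1) (-1)).foldl (pvBStep H W r) d) ∧
      (∀ p : Int × Int, pvInR H W p → (r < p.1 ∨ p.1 = r) →
        pvGet2 ((PySem.List.pyRange cs (-1) (-1)).foldl (pvBStep H W r) d) p.1 p.2 = pvLb S p) ∧
      (∀ p : Int × Int, pvInR H W p → p.1 < r →
        pvGet2 ((PySem.List.pyRange cs (-1) (-1)).foldl (pvBStep H W r) d) p.1 p.2 = pvF1 S p) := by
  intro n
  induction n with
  | zero =>
    intro cs d hn hcs hd hbef haft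
    have hnil : PySem.List.pyRange cs (-1) (-1) = [] := PySem.List.pyRange_neg_one_eq_nil (by omega)
    rw [hnil]
    simp only [List.foldl_nil]
    refine ⟨hd, ?_, ?_⟩
    · intro p hp hple
      rcases hple with h | h
      · exact hbef p hp (Or.inl h)
      · exact hbef p hp (Or.inr ⟨h, by obtain ⟨_, _, h3, _⟩ := hp; omega⟩)
    · intro p hp hgt
      exact haft p hp (Or.inl hgt)
  | succ n ih =>
    intro cs d hn hcs hd hbef haft
    have hcs0 : 0 ≤ cs := by omega
    rw [PySem.List.pyRange_neg_one_cons (by omega : (-1 : Int) < cs)]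
    simp only [List.foldl_cons]
    have hin : pvInR H W (r, cs) := ⟨hr, hrH, hcs0, hcs⟩
    have hstep : pvBStep H W r d cs = pvSet2 d r cs (pvLb S (r, cs)) := by
      apply pvBStep_eval hS hd hin
      · exact haft (r, cs) hin (Or.inr ⟨rfl, le_refl _⟩)
      · intro h0
        exact hbef (r + 1, cs) ⟨by omega, by omega, hcs0, hcs⟩ (Or.inl (by omega))
      · intro h0
        exact hbef (r, cs + 1) ⟨hr, hrH, by omega, by omega⟩ (Or.inr ⟨rfl, by omega⟩)
    rw [hstep]
    have hd' := pvDims_set2' hd hin (pvLb S (r, cs))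
    apply ih (cs - 1) _ (by omega) (by omega) hd'
    · intro p hp hreg
      by_cases hpe : (r, cs) = p
      · rw [← hpe]
        exact pvGet2_set2_self' hd hin _
      · rw [pvGet2_set2_ne' hd hin hp hpe _]
        rcases hreg with h | ⟨h1, h2⟩
        · exact hbef p hp (Or.inl h)
        · by_cases hc : p.2 = cs
          · exact absurd (Prod.ext h1 hc).symm hpe
          · exact hbef p hp (Or.inr ⟨h1, by omega⟩)
    · intro p hp hreg
      have hpe : (r, cs) ≠ p := by
        intro heq
        rw [← heq] at hreg
        rcases hreg with h | ⟨h1, h2⟩ <;> (try dsimp only at *) <;> omega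
      rw [pvGet2_set2_ne' hd hin hp hpe _]
      apply haft p hp
      rcases hreg with h | ⟨h1, h2⟩
      · exact Or.inl h
      · exact Or.inr ⟨h1, by omega⟩

lemma pvSweepB_correct {H W : Int} {S : List (Int × Int)} (hS : ∀ s ∈ S, pvInR H W s) :
    ∀ (n : Nat) (rs : Int) (d : List (List Int)), (rs + 1).toNat = n → rs < H →
      pvDims H W d →
      (∀ p : Int × Int, pvInR H W p → rs < p.1 → pvGet2 d p.1 p.2 = pvLb S p) →
      (∀ p : Int × Int, pvInR H W p → p.1 ≤ rs → pvGet2 d p.1 p.2 = pvF1 S p) →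
      pvDims H W ((PySem.List.pyRange rs (-1) (-1)).foldl
        (fun dist r => (PySem.List.pyRange (W - 1) (-1) (-1)).foldl (pvBStep H W r) dist) d) ∧
      (∀ p : Int × Int, pvInR H W p →
        pvGet2 ((PySem.List.pyRange rs (-1) (-1)).foldl
          (fun dist r => (PySem.List.pyRange (W - 1) (-1) (-1)).foldl (pvBStep H W r) dist) d)
          p.1 p.2 = pvLb S p) := by
  intro n
  induction n with
  | zero =>
    intro rs d hn hrs hd hbef _
    have hnil : PySem.List.pyRange rs (-1) (-1) = [] := PySem.List.pyRange_neg_one_eq_nil (by omega)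
    rw [hnil]
    simp only [List.foldl_nil]
    exact ⟨hd, fun p hp => hbef p hp (by obtain ⟨h1, _, _, _⟩ := hp; omega)⟩
  | succ n ih =>
    intro rs d hn hrs hd hbef haft
    have hrs0 : 0 ≤ rs := by omega
    rw [PySem.List.pyRange_neg_one_cons (by omega : (-1 : Int) < rs)]
    simp only [List.foldl_cons]
    obtain ⟨hd', hge, hlt⟩ := pvSweepB_inner hS hrs0 hrs ((W - 1) + 1).toNat (W - 1)
      d (by omega) (by omega) hd
      (fun p hp hreg => by
        rcases hreg with h | ⟨h1, h2⟩
        · exact hbef p hp h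
        · exact absurd h2 (by obtain ⟨_, _, _, h4⟩ := hp; omega))
      (fun p hp hreg => haft p hp (by rcases hreg with h | ⟨h1, _⟩ <;> omega))
    apply ih (rs - 1) _ (by omega) (by omega) hd'
    · intro p hp hlt'
      apply hge p hp
      omega
    · intro p hp hle
      exact hlt p hp (by omega)

-- settlements of the scan: membership and size
lemma pvSettlements_eq (grid : List (List Int)) (H W : Int) :
    pvSettlements grid H W = (PySem.List.pyRange 0 H 1).flatMap (fun r =>
      ((PySem.List.pyRange 0 W 1).filter
        (fun c => pvGet2 grid r c == 1 || pvGet2 grid r c == 2)).map (fun c => (r, c))) := by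
  unfold pvSettlements
  have hinner : ∀ (r : Int) (acc : List (Int × Int)),
      (PySem.List.pyRange 0 W 1).foldl (fun acc c =>
        if pvGet2 grid r c == 1 || pvGet2 grid r c == 2 then acc ++ [(r, c)] else acc) acc =
      acc ++ ((PySem.List.pyRange 0 W 1).filter
        (fun c => pvGet2 grid r c == 1 || pvGet2 grid r c == 2)).map (fun c => (r, c)) := by
    intro r acc
    exact PySem.List.foldl_append_if _ _ _ _
  simp only [hinner]
  exact PySem.List.foldl_append_eq_flatMap _ _ _

lemma pvMem_settlements {grid : List (List Int)} {H W : Int} {s : Int × Int} :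
    s ∈ pvSettlements grid H W ↔
      pvInR H W s ∧ (pvGet2 grid s.1 s.2 = 1 ∨ pvGet2 grid s.1 s.2 = 2) := by
  rw [pvSettlements_eq]
  simp only [List.mem_flatMap, List.mem_map, List.mem_filter, PySem.List.mem_pyRange_one]
  unfold pvInR
  constructor
  · rintro ⟨r, ⟨hr0, hrH⟩, c, ⟨⟨hc0, hcW⟩, hcell⟩, rfl⟩
    simp only [Bool.or_eq_true, beq_iff_eq] at hcell
    exact ⟨⟨hr0, hrH, hc0, hcW⟩, hcell⟩
  · rintro ⟨⟨h1, h2, h3, h4⟩, hcell⟩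
    refine ⟨s.1, ⟨h1, h2⟩, s.2, ⟨⟨h3, h4⟩, ?_⟩, rfl⟩
    simpa only [Bool.or_eq_true, beq_iff_eq] using hcell

lemma pvSettlements_inR {grid : List (List Int)} {H W : Int} :
    ∀ s ∈ pvSettlements grid H W, pvInR H W s :=
  fun _ hs => (pvMem_settlements.mp hs).1

lemma pvSettlements_length_le (grid : List (List Int)) (H W : Int) :
    (pvSettlements grid H W).length ≤ H.toNat * W.toNat := by
  rw [pvSettlements_eq, List.length_flatMap]
  calc ((PySem.List.pyRange 0 H 1).map (fun r =>
        (((PySem.List.pyRange 0 W 1).filter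
          (fun c => pvGet2 grid r c == 1 || pvGet2 grid r c == 2)).map (fun c => (r, c))).length)).sum
      ≤ ((PySem.List.pyRange 0 H 1).map (fun r =>
        (((PySem.List.pyRange 0 W 1).filter
          (fun c => pvGet2 grid r c == 1 || pvGet2 grid r c == 2)).map (fun c => (r, c))).length)).length
          • W.toNat := by
        apply List.sum_le_card_nsmul
        intro x hx
        simp only [List.mem_map] at hx
        obtain ⟨r, _, rfl⟩ := hx
        rw [List.length_map]
        calc ((PySem.List.pyRange 0 W 1).filter _).length
            ≤ (PySem.List.pyRange 0 W 1).length := List.length_filter_le _ _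
          _ = W.toNat := by rw [PySem.List.length_pyRange_one]; omega
    _ = H.toNat * W.toNat := by
        rw [List.length_map, PySem.List.length_pyRange_one, smul_eq_mul]
        congr 1
        omega

-- the all-999 seed table
lemma pvInit999_dims (H W : Int) : pvDims H W (pvInit999 H W) := by
  unfold pvInit999 pvDims
  constructor
  · rw [List.length_map, PySem.List.length_pyRange_one]; omega
  · intro row hrow
    simp only [List.mem_map] at hrow
    obtain ⟨_, _, rfl⟩ := hrow
    exact List.length_replicate ..

lemma pvInit999_get2 {H W : Int} {p : Int × Int} (hp : pvInR H W p) :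
    pvGet2 (pvInit999 H W) p.1 p.2 = 999 := by
  obtain ⟨h1, h2, h3, h4⟩ := hp
  unfold pvInit999 pvGet2
  rw [PySem.List.pyGetD_map_pyRange_of_nonneg _ H p.1 _ h1 h2]
  rw [PySem.List.pyGetD_eq_getElem _ _ h3 (by rw [List.length_replicate]; omega)]
  exact List.getElem_replicate ..

-- B's seed table (0 at settlements, 999 elsewhere)
lemma pvInitB_dims (grid : List (List Int)) (H W : Int) :
    pvDims H W ((PySem.List.pyRange 0 H 1).map (fun r =>
      (PySem.List.pyRange 0 W 1).map (fun c =>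
        if pvGet2 grid r c == 1 || pvGet2 grid r c == 2 then (0 : Int) else 999))) := by
  constructor
  · rw [List.length_map, PySem.List.length_pyRange_one]; omega
  · intro row hrow
    simp only [List.mem_map] at hrow
    obtain ⟨_, _, rfl⟩ := hrow
    rw [List.length_map, PySem.List.length_pyRange_one]; omega

lemma pvInitB_get2 {grid : List (List Int)} {H W : Int} {p : Int × Int} (hp : pvInR H W p) :
    pvGet2 ((PySem.List.pyRange 0 H 1).map (fun r =>
      (PySem.List.pyRange 0 W 1).map (fun c =>
        if pvGet2 grid r c == 1 || pvGet2 grid r c == 2 then (0 : Int) else 999))) p.1 p.2 =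
    (if p ∈ pvSettlements grid H W then (0 : Int) else 999) := by
  obtain ⟨h1, h2, h3, h4⟩ := hp
  have step1 : pvGet2 ((PySem.List.pyRange 0 H 1).map (fun r =>
      (PySem.List.pyRange 0 W 1).map (fun c =>
        if pvGet2 grid r c == 1 || pvGet2 grid r c == 2 then (0 : Int) else 999))) p.1 p.2 =
      (if pvGet2 grid p.1 p.2 == 1 || pvGet2 grid p.1 p.2 == 2 then (0 : Int) else 999) := by
    unfold pvGet2
    rw [PySem.List.pyGetD_map_pyRange_of_nonneg _ H p.1 _ h1 h2,
        PySem.List.pyGetD_map_pyRange_of_nonneg _ W p.2 _ h3 h4]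
  rw [step1]
  by_cases hmem : p ∈ pvSettlements grid (H := H) (W := W)
  · have := (pvMem_settlements.mp hmem).2
    rw [if_pos hmem, if_pos (by simpa only [Bool.or_eq_true, beq_iff_eq] using this)]
  · rw [if_neg hmem, if_neg ?_]
    intro hc
    exact hmem (pvMem_settlements.mpr ⟨⟨h1, h2, h3, h4⟩,
      by simpa only [Bool.or_eq_true, beq_iff_eq] using hc⟩)

-- B's output computes the capped distance table
lemma pvAlt_spec (grid : List (List Int)) :
    pvDims (grid.length : Int) ((PySem.List.pyGetD grid 0 []).length : Int)
      (precompute_settlement_distances_py_alt grid) ∧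
    (∀ p : Int × Int, pvInR (grid.length : Int) ((PySem.List.pyGetD grid 0 []).length : Int) p →
      pvGet2 (precompute_settlement_distances_py_alt grid) p.1 p.2 =
        pvLb (pvSettlements grid (grid.length : Int)
          ((PySem.List.pyGetD grid 0 []).length : Int)) p) := by
  have hS := pvSettlements_inR (grid := grid) (H := (grid.length : Int))
    (W := ((PySem.List.pyGetD grid 0 []).length : Int))
  obtain ⟨hd1, hq1⟩ := pvSweepF_correct hS ((grid.length : Int) - 0).toNat 0 _ rfl (by omega)
    (pvInitB_dims grid _ _)
    (fun p hp h => absurd h (by obtain ⟨h1, _, _, _⟩ := hp; omega))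
    (fun p hp _ => pvInitB_get2 hp)
  obtain ⟨hd2, hq2⟩ := pvSweepB_correct hS (((grid.length : Int) - 1) + 1).toNat
    ((grid.length : Int) - 1) _ rfl (by omega) hd1
    (fun p hp h => absurd h (by obtain ⟨_, h2, _, _⟩ := hp; omega))
    (fun p hp _ => hq1 p hp)
  unfold precompute_settlement_distances_py_alt pvSweepB pvSweepF
  exact ⟨hd2, hq2⟩

-- sum bookkeeping for the BFS measure
def pvDistSum (d : List (List Int)) : Nat := (d.map (fun row => (row.map Int.toNat).sum)).sum

def pvQMeasure (d : List (List Int)) (q : List (Int × Int)) : Nat := pvDistSum d + q.length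

lemma pvSum_set_nat (l : List Nat) (i : Nat) (x : Nat) (h : i < l.length) :
    (l.set i x).sum + l[i] = l.sum + x := by
  have hsplit : l.sum = (l.take i).sum + ((l.drop i).sum) := (List.sum_take_add_sum_drop l i).symm
  have hdrop : l.drop i = l[i] :: l.drop (i + 1) := List.drop_eq_getElem_cons h
  rw [List.sum_set]
  rw [hsplit, hdrop]
  simp only [List.sum_cons, if_pos h]
  omega

lemma pvGet2_eq_getElem' {H W : Int} {d : List (List Int)} (hd : pvDims H W d) {r c : Int}
    (h : pvInR H W (r, c)) (h1 : r.toNat < d.length) (h2 : c.toNat < d[r.toNat].length) :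
    pvGet2 d r c = d[r.toNat][c.toNat] := by
  simpa using pvGet2_eq_getElem hd h (by simpa using h1) (by simpa using h2)

lemma pvDistSum_set2 {H W : Int} {d : List (List Int)} (hd : pvDims H W d) {r c : Int}
    (hin : pvInR H W (r, c)) (v : Int) :
    pvDistSum (pvSet2 d r c v) + (pvGet2 d r c).toNat = pvDistSum d + v.toNat := by
  obtain ⟨h1, h2⟩ := pvInR_bounds hd hin
  (try dsimp only at h1 h2)
  obtain ⟨g1, g2, g3, g4⟩ := hin
  (try dsimp only at g1 g2 g3 g4)
  have hrow : PySem.List.pyGetD d r [] = d[r.toNat] :=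
    PySem.List.pyGetD_eq_getElem d [] g1 (by omega)
  have hget : pvGet2 d r c = d[r.toNat][c.toNat] :=
    pvGet2_eq_getElem' hd ⟨g1, g2, g3, g4⟩ h1 h2
  unfold pvDistSum pvSet2
  rw [hrow, hget, List.map_set]
  have houter := pvSum_set_nat (d.map (fun row => (row.map Int.toNat).sum)) r.toNat
    ((d[r.toNat].set c.toNat v).map Int.toNat).sum (by rw [List.length_map]; omega)
  rw [List.getElem_map] at houter
  have hinner := pvSum_set_nat (d[r.toNat].map Int.toNat) c.toNat v.toNat
    (by rw [List.length_map]; omega)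
  rw [List.getElem_map] at hinner
  rw [← List.map_set] at hinner
  omega

lemma pvDistSum_le {H W : Int} {d : List (List Int)} (hd : pvDims H W d)
    (hb : ∀ p : Int × Int, pvInR H W p → pvGet2 d p.1 p.2 ≤ 999) :
    pvDistSum d ≤ 999 * (H.toNat * W.toNat) := by
  unfold pvDistSum
  calc (d.map (fun row => (row.map Int.toNat).sum)).sum
      ≤ (d.map (fun row => (row.map Int.toNat).sum)).length • (999 * W.toNat) := by
        apply List.sum_le_card_nsmul
        intro x hx
        simp only [List.mem_map] at hx
        obtain ⟨row, hrowmem, rfl⟩ := hx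
        obtain ⟨i, hi, rfl⟩ := List.mem_iff_getElem.mp hrowmem
        calc (d[i].map Int.toNat).sum ≤ (d[i].map Int.toNat).length • 999 := by
              apply List.sum_le_card_nsmul
              intro y hy
              simp only [List.mem_map] at hy
              obtain ⟨z, hzmem, rfl⟩ := hy
              obtain ⟨j, hj, rfl⟩ := List.mem_iff_getElem.mp hzmem
              have hiH : (i : Int) < H := by have := hd.1; omega
              have hjW : (j : Int) < W := by
                have := hd.2 _ (List.getElem_mem hi); omega
              have hp : pvInR H W ((i : Int), (j : Int)) := ⟨by omega, hiH, by omega, hjW⟩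
              have := hb _ hp
              rw [pvGet2_eq_getElem hd hp (by simpa using hi) (by simpa using hj)] at this
              (try dsimp only at this)
              simp only [Int.toNat_natCast] at this
              omega
          _ = d[i].length • 999 := by rw [List.length_map]
          _ = 999 * W.toNat := by
              rw [hd.2 _ (List.getElem_mem hi), smul_eq_mul]; ring
    _ = 999 * (H.toNat * W.toNat) := by
        rw [List.length_map, hd.1, smul_eq_mul]; ring

-- the seeding loop: zero out settlements and queue them
lemma pvSeed_spec {H W : Int} :
    ∀ (S0 : List (Int × Int)) (d : List (List Int)) (q : List (Int × Int)),
      pvDims H W d → (∀ s ∈ S0, pvInR H W s) →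
      pvDims H W (S0.foldl (fun st s => (pvSet2 st.1 s.1 s.2 0, st.2 ++ [s])) (d, q)).1 ∧
      (S0.foldl (fun st s => (pvSet2 st.1 s.1 s.2 0, st.2 ++ [s])) (d, q)).2 = q ++ S0 ∧
      (∀ p : Int × Int, pvInR H W p →
        pvGet2 (S0.foldl (fun st s => (pvSet2 st.1 s.1 s.2 0, st.2 ++ [s])) (d, q)).1 p.1 p.2 =
          (if p ∈ S0 then (0 : Int) else pvGet2 d p.1 p.2)) := by
  intro S0
  induction S0 with
  | nil =>
    intro d q hd _
    exact ⟨hd, by simp, fun p hp => by simp⟩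
  | cons s S0 ih =>
    intro d q hd hS0
    have hs : pvInR H W s := hS0 s List.mem_cons_self
    have hd' : pvDims H W (pvSet2 d s.1 s.2 0) := pvDims_set2 hd hs 0
    obtain ⟨ihd, ihq, ihg⟩ := ih (pvSet2 d s.1 s.2 0) (q ++ [s]) hd'
      (fun t ht => hS0 t (List.mem_cons_of_mem _ ht))
    simp only [List.foldl_cons]
    refine ⟨ihd, by rw [ihq]; simp, ?_⟩
    intro p hp
    rw [ihg p hp]
    by_cases hmem : p ∈ S0
    · rw [if_pos hmem, if_pos (List.mem_cons_of_mem _ hmem)]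
    · rw [if_neg hmem]
      by_cases hps : p = s
      · rw [if_pos (by rw [hps]; exact List.mem_cons_self), hps]
        exact pvGet2_set2_self hd hs 0
      · rw [if_neg (by simp [hps, hmem]), pvGet2_set2_ne hd hs hp (fun h => hps h.symm) 0]

def pvBfsInv (H W : Int) (S : List (Int × Int)) (d : List (List Int))
    (q : List (Int × Int)) : Prop :=
  pvDims H W d ∧
  (∀ p : Int × Int, pvInR H W p → pvLb S p ≤ pvGet2 d p.1 p.2 ∧ pvGet2 d p.1 p.2 ≤ 999) ∧
  (∀ s ∈ S, pvGet2 d s.1 s.2 = 0) ∧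
  (∀ p ∈ q, pvInR H W p) ∧
  (∀ u v : Int × Int, pvInR H W u → pvInR H W v → pvManh u v = 1 →
    pvGet2 d v.1 v.2 ≤ pvGet2 d u.1 u.2 + 1 ∨ u ∈ q)

lemma pvRelax_one {H W : Int} {S : List (Int × Int)} (hS : ∀ s ∈ S, pvInR H W s)
    {r c : Int} (hu : pvInR H W (r, c))
    {d : List (List Int)} {q : List (Int × Int)} (dd : Int × Int)
    (hd : pvDims H W d)
    (hb : ∀ p : Int × Int, pvInR H W p → pvLb S p ≤ pvGet2 d p.1 p.2 ∧ pvGet2 d p.1 p.2 ≤ 999)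
    (hz : ∀ s ∈ S, pvGet2 d s.1 s.2 = 0)
    (hq : ∀ p ∈ q, pvInR H W p)
    (hdd : pvManh (r, c) (r + dd.1, c + dd.2) = 1) :
    ∀ st' : List (List Int) × List (Int × Int), st' = pvRelax H W r c (d, q) dd →
    pvDims H W st'.1 ∧
    (∀ p : Int × Int, pvInR H W p →
      pvLb S p ≤ pvGet2 st'.1 p.1 p.2 ∧ pvGet2 st'.1 p.1 p.2 ≤ 999) ∧
    (∀ s ∈ S, pvGet2 st'.1 s.1 s.2 = 0) ∧
    (∀ p ∈ st'.2, pvInR H W p) ∧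
    (∀ p : Int × Int, pvInR H W p → pvGet2 st'.1 p.1 p.2 ≤ pvGet2 d p.1 p.2) ∧
    (∀ p : Int × Int, pvInR H W p → pvGet2 st'.1 p.1 p.2 = pvGet2 d p.1 p.2 ∨ p ∈ st'.2) ∧
    (∀ p ∈ q, p ∈ st'.2) ∧
    (pvGet2 st'.1 r c = pvGet2 d r c) ∧
    (pvInR H W (r + dd.1, c + dd.2) →
      pvGet2 st'.1 (r + dd.1) (c + dd.2) ≤ pvGet2 d r c + 1) ∧
    (pvQMeasure st'.1 st'.2 ≤ pvQMeasure d q) := by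
  intro st' hst'
  have hune : (r, c) ≠ (r + dd.1, c + dd.2) := by
    intro h
    rw [← h] at hdd
    unfold pvManh at hdd
    omega
  unfold pvRelax at hst'
  (try dsimp only at hst')
  by_cases hcond : 0 ≤ r + dd.1 ∧ r + dd.1 < H ∧ 0 ≤ c + dd.2 ∧ c + dd.2 < W ∧
      pvGet2 d r c + 1 < pvGet2 d (r + dd.1) (c + dd.2)
  · rw [if_pos hcond] at hst'
    obtain ⟨hc1, hc2, hc3, hc4, hlt⟩ := hcond
    have hx : pvInR H W (r + dd.1, c + dd.2) := ⟨hc1, hc2, hc3, hc4⟩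
    have hur := hb (r, c) hu
    (try dsimp only at hur)
    have hu0 : 0 ≤ pvGet2 d r c := le_trans (pvLb_nonneg S (r, c)) hur.1
    have hget : ∀ p : Int × Int, pvInR H W p →
        pvGet2 st'.1 p.1 p.2 = (if p = (r + dd.1, c + dd.2) then pvGet2 d r c + 1
          else pvGet2 d p.1 p.2) := by
      intro p hp
      rw [hst']
      by_cases hpe : p = (r + dd.1, c + dd.2)
      · rw [if_pos hpe, hpe]
        (try dsimp only)
        exact pvGet2_set2_self' hd hx _
      · rw [if_neg hpe]
        (try dsimp only)
        exact pvGet2_set2_ne' hd hx hp (fun h => hpe h.symm) _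
    have hxval := hb (r + dd.1, c + dd.2) hx
    (try dsimp only at hxval)
    have hq2 : st'.2 = q ++ [(r + dd.1, c + dd.2)] := by rw [hst']
    refine ⟨?_, ?_, ?_, ?_, ?_, ?_, ?_, ?_, ?_, ?_⟩
    · rw [hst']; exact pvDims_set2' hd hx _
    · intro p hp
      rw [hget p hp]
      split_ifs with hpe
      · subst hpe
        constructor
        · have hlip := pvLb_lipschitz S (r + dd.1, c + dd.2) (r, c)
          rw [hdd] at hlip
          omega
        · omega
      · exact hb p hp
    · intro s hsS
      by_cases hpe : s = (r + dd.1, c + dd.2)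
      · exfalso
        have h0 := hz s hsS
        rw [hpe] at h0
        (try dsimp only at h0)
        omega
      · rw [hget s (hS s hsS), if_neg hpe]
        exact hz s hsS
    · intro p hp
      rw [hq2] at hp
      rcases List.mem_append.mp hp with h | h
      · exact hq p h
      · rw [List.mem_singleton.mp h]
        exact hx
    · intro p hp
      rw [hget p hp]
      split_ifs with hpe
      · subst hpe
        (try dsimp only)
        omega
      · exact le_refl _
    · intro p hp
      by_cases hpe : p = (r + dd.1, c + dd.2)
      · right
        rw [hq2, hpe]
        simp
      · left
        rw [hget p hp, if_neg hpe]
    · intro p hp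
      rw [hq2]
      exact List.mem_append_left _ hp
    · rw [hget (r, c) hu]
      (try dsimp only)
      rw [if_neg hune]
    · intro _
      have h := hget (r + dd.1, c + dd.2) hx
      (try dsimp only at h)
      rw [h, if_pos rfl]
    · rw [hst']
      unfold pvQMeasure
      (try dsimp only)
      rw [List.length_append]
      have hsum := pvDistSum_set2 hd hx (pvGet2 d r c + 1)
      simp only [List.length_singleton]
      omega
  · rw [if_neg hcond] at hst'
    subst hst'
    refine ⟨hd, hb, hz, hq, fun p _ => le_refl _, fun p _ => Or.inl rfl,
      fun p hp => hp, rfl, ?_, le_refl _⟩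
    intro hx
    obtain ⟨hx1, hx2, hx3, hx4⟩ := hx
    (try dsimp only at hx1 hx2 hx3 hx4)
    by_contra hgt
    (try dsimp only at hgt)
    exact hcond ⟨hx1, hx2, hx3, hx4, by omega⟩

lemma pvBfsStep {H W : Int} {S : List (Int × Int)} (hS : ∀ s ∈ S, pvInR H W s)
    {r c : Int} {q : List (Int × Int)} {d : List (List Int)}
    (hInv : pvBfsInv H W S d ((r, c) :: q)) :
    ∀ st : List (List Int) × List (Int × Int),
      st = [((-1 : Int), (0 : Int)), (1, 0), (0, -1), (0, 1)].foldl (pvRelax H W r c) (d, q) →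
      pvBfsInv H W S st.1 st.2 ∧ pvQMeasure st.1 st.2 < pvQMeasure d ((r, c) :: q) := by
  intro st hst
  obtain ⟨hd, hb, hz, hqm, hedge⟩ := hInv
  have hu : pvInR H W (r, c) := hqm (r, c) List.mem_cons_self
  have hq : ∀ p ∈ q, pvInR H W p := fun p hp => hqm p (List.mem_cons_of_mem _ hp)
  simp only [List.foldl_cons, List.foldl_nil] at hst
  set st1 := pvRelax H W r c (d, q) (-1, 0) with he1
  set st2 := pvRelax H W r c st1 (1, 0) with he2
  set st3 := pvRelax H W r c st2 (0, -1) with he3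
  set st4 := pvRelax H W r c st3 (0, 1) with he4
  obtain ⟨D1, B1, Z1, Q1, M1, C1, S1, U1, X1, mu1⟩ :=
    pvRelax_one hS hu (-1, 0) hd hb hz hq (by unfold pvManh; (try dsimp only); omega) st1 he1
  obtain ⟨D2, B2, Z2, Q2, M2, C2, S2, U2, X2, mu2⟩ :=
    pvRelax_one hS hu (1, 0) D1 B1 Z1 Q1 (by unfold pvManh; (try dsimp only); omega) st2 he2
  obtain ⟨D3, B3, Z3, Q3, M3, C3, S3, U3, X3, mu3⟩ :=
    pvRelax_one hS hu (0, -1) D2 B2 Z2 Q2 (by unfold pvManh; (try dsimp only); omega) st3 he3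
  obtain ⟨D4, B4, Z4, Q4, M4, C4, S4, U4, X4, mu4⟩ :=
    pvRelax_one hS hu (0, 1) D3 B3 Z3 Q3 (by unfold pvManh; (try dsimp only); omega) st4 he4
  subst hst
  have hu4 : pvGet2 st4.1 r c = pvGet2 d r c := by
    have u4 := U4; have u3 := U3; have u2 := U2; have u1 := U1
    (try dsimp only at u4 u3 u2 u1)
    rw [u4, u3, u2, u1]
  constructor
  · refine ⟨D4, B4, Z4, Q4, ?_⟩
    intro u v huin hvin hm
    by_cases hw : u = (r, c)
    · left
      subst hw
      (try dsimp only)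
      rw [hu4]
      have hvcase : v = (r - 1, c) ∨ v = (r + 1, c) ∨ v = (r, c - 1) ∨ v = (r, c + 1) := by
        obtain ⟨v1, v2⟩ := v
        unfold pvManh at hm
        (try dsimp only at hm)
        simp only [Prod.mk.injEq]
        omega
      rcases hvcase with he | he | he | he <;> subst he
      · have hm4 := M4 (r - 1, c) hvin
        have hm3 := M3 (r - 1, c) hvin
        have hm2 := M2 (r - 1, c) hvin
        have hx := X1 (by simpa [show r + (-1 : Int) = r - 1 from by ring,
          show c + (0 : Int) = c from by ring] using hvin)
        simp only [show r + (-1 : Int) = r - 1 from by ring,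
          show c + (0 : Int) = c from by ring] at hx
        (try dsimp only at hm4 hm3 hm2 hx ⊢)
        omega
      · have hm4 := M4 (r + 1, c) hvin
        have hm3 := M3 (r + 1, c) hvin
        have hx := X2 (by simpa [show c + (0 : Int) = c from by ring] using hvin)
        simp only [show c + (0 : Int) = c from by ring] at hx
        have u1 := U1
        (try dsimp only at hm4 hm3 hx u1 ⊢)
        rw [u1] at hx
        omega
      · have hm4 := M4 (r, c - 1) hvin
        have hx := X3 (by simpa [show r + (0 : Int) = r from by ring,
          show c + (-1 : Int) = c - 1 from by ring] using hvin)
        simp only [show r + (0 : Int) = r from by ring,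
          show c + (-1 : Int) = c - 1 from by ring] at hx
        have u1 := U1; have u2 := U2
        (try dsimp only at hm4 hx u1 u2 ⊢)
        rw [u2, u1] at hx
        omega
      · have hx := X4 (by simpa [show r + (0 : Int) = r from by ring] using hvin)
        simp only [show r + (0 : Int) = r from by ring] at hx
        have u1 := U1; have u2 := U2; have u3 := U3
        (try dsimp only at hx u1 u2 u3 ⊢)
        rw [u3, u2, u1] at hx
        omega
    · rcases hedge u v huin hvin hm with hok | humem
      · have hchain : pvGet2 st4.1 u.1 u.2 = pvGet2 d u.1 u.2 ∨ u ∈ st4.2 := by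
          rcases C4 u huin with h4 | h4
          · rcases C3 u huin with h3 | h3
            · rcases C2 u huin with h2 | h2
              · rcases C1 u huin with h1 | h1
                · left; rw [h4, h3, h2, h1]
                · right; exact S4 _ (S3 _ (S2 _ h1))
              · right; exact S4 _ (S3 _ h2)
            · right; exact S4 _ h3
          · right; exact h4
        rcases hchain with heq | hq4
        · left
          have hv4 := M4 v hvin
          have hv3 := M3 v hvin
          have hv2 := M2 v hvin
          have hv1 := M1 v hvin
          rw [heq]
          omega
        · right; exact hq4
      · rcases List.mem_cons.mp humem with h | h
        · exact absurd h hw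
        · right; exact S4 _ (S3 _ (S2 _ (S1 _ h)))
  · have hcons : pvQMeasure d ((r, c) :: q) = pvDistSum d + q.length + 1 := by
      unfold pvQMeasure
      rw [List.length_cons]
      omega
    rw [hcons]
    have h1 : pvQMeasure d q = pvDistSum d + q.length := rfl
    omega

lemma pvBfs_loop {H W : Int} {S : List (Int × Int)} (hS : ∀ s ∈ S, pvInR H W s) :
    ∀ (fuel : Nat) (q : List (Int × Int)) (d : List (List Int)),
      pvBfsInv H W S d q → pvQMeasure d q < fuel →
      pvDims H W (pvBfs H W fuel q d) ∧
      (∀ p : Int × Int, pvInR H W p →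
        pvLb S p ≤ pvGet2 (pvBfs H W fuel q d) p.1 p.2 ∧
          pvGet2 (pvBfs H W fuel q d) p.1 p.2 ≤ 999) ∧
      (∀ s ∈ S, pvGet2 (pvBfs H W fuel q d) s.1 s.2 = 0) ∧
      (∀ u v : Int × Int, pvInR H W u → pvInR H W v → pvManh u v = 1 →
        pvGet2 (pvBfs H W fuel q d) v.1 v.2 ≤ pvGet2 (pvBfs H W fuel q d) u.1 u.2 + 1) := by
  intro fuel
  induction fuel with
  | zero => intro q d _ hmu; exact absurd hmu (by omega)
  | succ fuel ih =>
    intro q d hInv hmu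
    cases q with
    | nil =>
      simp only [pvBfs]
      obtain ⟨h1, h2, h3, _, h5⟩ := hInv
      refine ⟨h1, h2, h3, fun u v hu hv hm => ?_⟩
      rcases h5 u v hu hv hm with h | h
      · exact h
      · cases h
    | cons u q' =>
      obtain ⟨r, c⟩ := u
      obtain ⟨hInv', hmu'⟩ := pvBfsStep hS hInv
        ([((-1 : Int), (0 : Int)), (1, 0), (0, -1), (0, 1)].foldl (pvRelax H W r c) (d, q')) rfl
      simp only [pvBfs]
      exact ih _ _ hInv' (by omega)

lemma pvReach {H W : Int} {S : List (Int × Int)} {R : List (List Int)}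
    (hz : ∀ s ∈ S, pvGet2 R s.1 s.2 = 0)
    (hedge : ∀ u v : Int × Int, pvInR H W u → pvInR H W v → pvManh u v = 1 →
      pvGet2 R v.1 v.2 ≤ pvGet2 R u.1 u.2 + 1)
    {s : Int × Int} (hsS : s ∈ S) (hsin : pvInR H W s) :
    ∀ (n : Nat) (p : Int × Int), pvInR H W p → (pvManh s p).toNat = n →
      pvGet2 R p.1 p.2 ≤ pvManh s p := by
  intro n
  induction n with
  | zero =>
    intro p hp hn
    have hps : s = p := by
      obtain ⟨s1, s2⟩ := s; obtain ⟨p1, p2⟩ := p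
      unfold pvManh at hn
      (try dsimp only at hn)
      simp only [Prod.mk.injEq]
      constructor <;> omega
    rw [← hps]
    have h0 := hz s hsS
    have hmm : pvManh s s = 0 := by unfold pvManh; omega
    omega
  | succ n ih =>
    intro p hp hn
    have hms := pvManh_nonneg s p
    obtain ⟨hp1, hp2, hp3, hp4⟩ := hp
    obtain ⟨hs1, hs2, hs3, hs4⟩ := hsin
    by_cases h1 : s.1 < p.1
    · have hin' : pvInR H W (p.1 - 1, p.2) := ⟨by omega, by omega, hp3, hp4⟩
      have hstep : pvManh s (p.1 - 1, p.2) = pvManh s p - 1 := by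
        unfold pvManh; (try dsimp only); omega
      have hi := ih (p.1 - 1, p.2) hin' (by omega)
      have he := hedge (p.1 - 1, p.2) p hin' ⟨hp1, hp2, hp3, hp4⟩
        (by unfold pvManh; (try dsimp only); omega)
      (try dsimp only at hi he)
      omega
    · by_cases h2 : p.1 < s.1
      · have hin' : pvInR H W (p.1 + 1, p.2) := ⟨by omega, by omega, hp3, hp4⟩
        have hstep : pvManh s (p.1 + 1, p.2) = pvManh s p - 1 := by
          unfold pvManh; (try dsimp only); omega
        have hi := ih (p.1 + 1, p.2) hin' (by omega)
        have he := hedge (p.1 + 1, p.2) p hin' ⟨hp1, hp2, hp3, hp4⟩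
          (by unfold pvManh; (try dsimp only); omega)
        (try dsimp only at hi he)
        omega
      · have hner : pvManh s p = n + 1 := by omega
        by_cases h3 : s.2 < p.2
        · have hin' : pvInR H W (p.1, p.2 - 1) := ⟨hp1, hp2, by omega, by omega⟩
          have hstep : pvManh s (p.1, p.2 - 1) = pvManh s p - 1 := by
            unfold pvManh; (try dsimp only); omega
          have hi := ih (p.1, p.2 - 1) hin' (by omega)
          have he := hedge (p.1, p.2 - 1) p hin' ⟨hp1, hp2, hp3, hp4⟩
            (by unfold pvManh; (try dsimp only); omega)
          (try dsimp only at hi he)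
          omega
        · have h4 : p.2 < s.2 := by
            by_contra h4
            unfold pvManh at hner
            omega
          have hin' : pvInR H W (p.1, p.2 + 1) := ⟨hp1, hp2, by omega, by omega⟩
          have hstep : pvManh s (p.1, p.2 + 1) = pvManh s p - 1 := by
            unfold pvManh; (try dsimp only); omega
          have hi := ih (p.1, p.2 + 1) hin' (by omega)
          have he := hedge (p.1, p.2 + 1) p hin' ⟨hp1, hp2, hp3, hp4⟩
            (by unfold pvManh; (try dsimp only); omega)
          (try dsimp only at hi he)
          omega

lemma pvBfs_final {H W : Int} {S : List (Int × Int)} {R : List (List Int)}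
    (hS : ∀ s ∈ S, pvInR H W s)
    (hb : ∀ p : Int × Int, pvInR H W p → pvLb S p ≤ pvGet2 R p.1 p.2 ∧ pvGet2 R p.1 p.2 ≤ 999)
    (hz : ∀ s ∈ S, pvGet2 R s.1 s.2 = 0)
    (hedge : ∀ u v : Int × Int, pvInR H W u → pvInR H W v → pvManh u v = 1 →
      pvGet2 R v.1 v.2 ≤ pvGet2 R u.1 u.2 + 1) :
    ∀ p : Int × Int, pvInR H W p → pvGet2 R p.1 p.2 = pvLb S p := by
  intro p hp
  refine le_antisymm ?_ (hb p hp).1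
  apply le_pvLb (hb p hp).2
  intro s hs
  exact pvReach hz hedge hs (hS s hs) (pvManh s p).toNat p hp rfl

-- ===== VERDICT (by name: the statement is the Claim_ definition above) =====
theorem precompute_settlement_distances_py_spec : Claim_equal_precompute_settlement_distances_py := by
  intro grid _ _
  unfold Spec_precompute_settlement_distances_py
  unfold precompute_settlement_distances_py
  (try dsimp only)
  obtain ⟨haD, haG⟩ := pvAlt_spec grid
  by_cases hnil : pvSettlements grid (grid.length : Int)
      ((PySem.List.pyGetD grid 0 []).length : Int) = []
  · rw [if_pos hnil]
    apply pvTable_ext (pvInit999_dims _ _) haD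
    intro p hp
    rw [pvInit999_get2 hp, haG p hp, hnil]
    rfl
  · rw [if_neg hnil]
    have hS := pvSettlements_inR (grid := grid) (H := (grid.length : Int))
      (W := ((PySem.List.pyGetD grid 0 []).length : Int))
    obtain ⟨hsD, hsQ, hsG⟩ := pvSeed_spec
      (pvSettlements grid (grid.length : Int) ((PySem.List.pyGetD grid 0 []).length : Int))
      (pvInit999 (grid.length : Int) ((PySem.List.pyGetD grid 0 []).length : Int)) []
      (pvInit999_dims _ _) hS
    rw [List.nil_append] at hsQ
    have hInv : pvBfsInv (grid.length : Int) ((PySem.List.pyGetD grid 0 []).length : Int)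
        (pvSettlements grid (grid.length : Int) ((PySem.List.pyGetD grid 0 []).length : Int))
        ((pvSettlements grid (grid.length : Int)
            ((PySem.List.pyGetD grid 0 []).length : Int)).foldl
          (fun st s => (pvSet2 st.1 s.1 s.2 0, st.2 ++ [s]))
          (pvInit999 (grid.length : Int) ((PySem.List.pyGetD grid 0 []).length : Int), [])).1
        ((pvSettlements grid (grid.length : Int)
            ((PySem.List.pyGetD grid 0 []).length : Int)).foldl
          (fun st s => (pvSet2 st.1 s.1 s.2 0, st.2 ++ [s]))
          (pvInit999 (grid.length : Int) ((PySem.List.pyGetD grid 0 []).length : Int), [])).2 := by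
      refine ⟨hsD, ?_, ?_, ?_, ?_⟩
      · intro p hp
        rw [hsG p hp]
        split_ifs with hm
        · have hle := pvLb_le_manh hm p
          have hmm : pvManh p p = 0 := by unfold pvManh; omega
          constructor <;> omega
        · rw [pvInit999_get2 hp]
          exact ⟨pvLb_le_999 _ _, le_refl _⟩
      · intro s hsS
        rw [hsG s (hS s hsS), if_pos hsS]
      · rw [hsQ]
        exact hS
      · intro u v huin hvin hm
        by_cases humem : u ∈ pvSettlements grid (grid.length : Int)
            ((PySem.List.pyGetD grid 0 []).length : Int)
        · right
          rw [hsQ]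
          exact humem
        · left
          rw [hsG u huin, if_neg humem, hsG v hvin]
          split_ifs with hv
          · rw [pvInit999_get2 huin]; omega
          · rw [pvInit999_get2 huin, pvInit999_get2 hvin]
            omega
    have hmu : pvQMeasure
        ((pvSettlements grid (grid.length : Int)
            ((PySem.List.pyGetD grid 0 []).length : Int)).foldl
          (fun st s => (pvSet2 st.1 s.1 s.2 0, st.2 ++ [s]))
          (pvInit999 (grid.length : Int) ((PySem.List.pyGetD grid 0 []).length : Int), [])).1
        ((pvSettlements grid (grid.length : Int)
            ((PySem.List.pyGetD grid 0 []).length : Int)).foldl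
          (fun st s => (pvSet2 st.1 s.1 s.2 0, st.2 ++ [s]))
          (pvInit999 (grid.length : Int) ((PySem.List.pyGetD grid 0 []).length : Int), [])).2 <
        1000 * (grid.length : Int).toNat * ((PySem.List.pyGetD grid 0 []).length : Int).toNat + 1 := by
      have hds := pvDistSum_le hsD (fun p hp => by
        rw [hsG p hp]
        split_ifs
        · omega
        · rw [pvInit999_get2 hp])
      have hlen := pvSettlements_length_le grid (grid.length : Int)
        ((PySem.List.pyGetD grid 0 []).length : Int)
      unfold pvQMeasure
      rw [hsQ]
      have hmul : 1000 * (grid.length : Int).toNat * ((PySem.List.pyGetD grid 0 []).length : Int).toNat =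
          1000 * ((grid.length : Int).toNat * ((PySem.List.pyGetD grid 0 []).length : Int).toNat) := by
        ring
      rw [hmul]
      omega
    obtain ⟨hfD, hfB, hfZ, hfE⟩ := pvBfs_loop hS _ _ _ hInv hmu
    apply pvTable_ext hfD haD
    intro p hp
    rw [pvBfs_final hS hfB hfZ hfE p hp, haG p hp]
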